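-- pv_equiv track=rewrite | github.com/heimgewebe/weltgewebe | scripts/docmeta/generate_relations_analysis.py | find_hubs
-- ===== SOURCE A (Python) =====
-- HUB_OUTBOUND_THRESHOLD = 8
--
-- HUB_INBOUND_THRESHOLD = 10
--
-- def find_hubs(stats):
--     """Find documents with high outbound or inbound relation counts."""
--     outbound_hubs = []
--     inbound_hubs = []
--
--     for doc, s in sorted(stats.items()):
--         if s["outbound"] >= HUB_OUTBOUND_THRESHOLD:
--             outbound_hubs.append((doc, s["outbound"]))
--         if s["inbound"] >= HUB_INBOUND_THRESHOLD:
--             inbound_hubs.append((doc, s["inbound"]))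
--
--     outbound_hubs.sort(key=lambda x: -x[1])
--     inbound_hubs.sort(key=lambda x: -x[1])
--     return outbound_hubs, inbound_hubs
-- ===== SOURCE B (Python) =====
-- HUB_OUTBOUND_THRESHOLD = 8
--
-- HUB_INBOUND_THRESHOLD = 10
--
--
-- def _hubs(stats, field, threshold):
--     # Bucket docs by their exact count, then emit buckets in descending
--     # count order, each bucket's docs in ascending order (matches A's
--     # stable descending sort of a doc-ascending list).
--     buckets = {}
--     for doc, s in stats.items():
--         count = s[field]
--         if count >= threshold:
--             buckets.setdefault(count, []).append(doc)
--     out = []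
--     for count in sorted(buckets, reverse=True):
--         for doc in sorted(buckets[count]):
--             out.append((doc, count))
--     return out
--
--
-- def find_hubs(stats):
--     """Find documents with high outbound or inbound relation counts."""
--     return (_hubs(stats, "outbound", HUB_OUTBOUND_THRESHOLD),
--             _hubs(stats, "inbound", HUB_INBOUND_THRESHOLD))
-- ===== Notes on version B (the rewrite author's own statement) =====
-- stated objective: alternative
-- what changed: Replaces A's global pre-sort of all items plus a stable per-list sort of (doc,count) pairs with a bucketing algorithm: docs are grouped into a dict keyed by their exact count, the distinct counts are sorted descending and each bucket's docs sorted ascending, and the output is emitted bucket by bucket.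
import Mathlib
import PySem

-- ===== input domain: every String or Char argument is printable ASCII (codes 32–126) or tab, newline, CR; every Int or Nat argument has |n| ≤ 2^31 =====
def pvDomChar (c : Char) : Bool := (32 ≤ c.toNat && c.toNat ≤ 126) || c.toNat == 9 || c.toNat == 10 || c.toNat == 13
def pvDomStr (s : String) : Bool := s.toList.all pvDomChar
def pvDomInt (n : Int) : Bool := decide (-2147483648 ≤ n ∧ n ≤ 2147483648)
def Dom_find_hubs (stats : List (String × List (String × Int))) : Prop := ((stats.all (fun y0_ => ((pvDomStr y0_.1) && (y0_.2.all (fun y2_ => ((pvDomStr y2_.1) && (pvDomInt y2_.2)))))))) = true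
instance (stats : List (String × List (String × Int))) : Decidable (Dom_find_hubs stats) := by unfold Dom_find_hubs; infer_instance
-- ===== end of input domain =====

-- B replaces A's global pre-sort plus stable per-list value sort by a bucketing algorithm:
-- group docs into a dict keyed by exact count, emit buckets by descending count with each
-- bucket's docs sorted ascending. Equality of return values on Pre_ (distinct doc keys).


-- ===== PORT A =====
-- One loop over sorted(stats.items()) appending to two lists, then a stable sort of each by
-- -count. sorted(stats.items()) compares (doc, dict) tuples; under Pre_ (distinct doc keys)
-- only the docs are ever compared, so the key-projection sort is exact. s["outbound"] /
-- s["inbound"] are ported as getD with default 0, exact under Pre_ (both keys present).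
def find_hubs (stats : List (String × List (String × Int))) : (List (String × Int)) × (List (String × Int)) :=
  let hubs := (PySem.List.sorted stats (fun p => p.1)).foldl
    (fun (acc : List (String × Int) × List (String × Int)) p =>
      (if 8 ≤ (PySem.Dict.mk p.2).getD "outbound" 0 then
          acc.1 ++ [(p.1, (PySem.Dict.mk p.2).getD "outbound" 0)] else acc.1,
       if 10 ≤ (PySem.Dict.mk p.2).getD "inbound" 0 then
          acc.2 ++ [(p.1, (PySem.Dict.mk p.2).getD "inbound" 0)] else acc.2))
    ([], [])
  (PySem.List.sorted hubs.1 (fun x => -x.2), PySem.List.sorted hubs.2 (fun x => -x.2))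

-- ===== PORT B =====
-- _hubs(stats, field, threshold): bucket docs by count into a dict (setdefault+append is the
-- modify-with-default loop), then for count in sorted(buckets, reverse=True), for doc in
-- sorted(buckets[count]), append (doc, count).
def bucketHubs (stats : List (String × List (String × Int))) (field : String) (thr : Int) : List (String × Int) :=
  let buckets := stats.foldl
    (fun (b : PySem.Dict Int (List String)) p =>
      if thr ≤ (PySem.Dict.mk p.2).getD field 0 then
        b.modify ((PySem.Dict.mk p.2).getD field 0) [] (fun l => l ++ [p.1])
      else b)
    PySem.Dict.empty
  (PySem.List.sorted buckets.keys (fun c => c) true).foldl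
    (fun out c =>
      (PySem.List.sorted (buckets.getD c []) (fun s => s)).foldl
        (fun out doc => out ++ [(doc, c)]) out)
    []

def find_hubs_alt (stats : List (String × List (String × Int))) : (List (String × Int)) × (List (String × Int)) :=
  (bucketHubs stats "outbound" 8, bucketHubs stats "inbound" 10)

-- ===== PRECONDITION & SPEC =====
-- Pre_ excludes inputs where A raises: an inner dict missing the key "outbound" or "inbound"
-- (KeyError), and duplicate doc keys (impossible for a real Python dict; there
-- sorted(stats.items()) would compare the dict values and raise TypeError).
def Pre_find_hubs (stats : List (String × List (String × Int))) : Prop :=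
  (stats.map Prod.fst).Nodup ∧
  stats.all (fun p => (PySem.Dict.mk p.2).contains "outbound" && (PySem.Dict.mk p.2).contains "inbound") = true
instance (stats : List (String × List (String × Int))) : Decidable (Pre_find_hubs stats) := by unfold Pre_find_hubs; infer_instance

def pvWitness_find_hubs : (List (String × List (String × Int))) :=
  [("a", [("outbound", 9), ("inbound", 11)]), ("b", [("outbound", 2), ("inbound", 11)])]

def Spec_find_hubs (stats : List (String × List (String × Int))) (out : (List (String × Int)) × (List (String × Int))) : Prop := out = find_hubs_alt stats
instance (stats : List (String × List (String × Int))) (out : (List (String × Int)) × (List (String × Int))) : Decidable (Spec_find_hubs stats out) := by unfold Spec_find_hubs; infer_instance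

-- ===== CLAIM (what is proved, stated in full; the proofs are below) =====
def Claim_equal_find_hubs : Prop := ∀ (stats : List (String × List (String × Int))), Dom_find_hubs stats → Pre_find_hubs stats → Spec_find_hubs stats (find_hubs stats)

-- ===== LEMMAS AND PROOFS =====

-- The order in which both programs emit hub pairs: count descending, doc ascending on ties.
def hubLex (a b : String × Int) : Prop := (-a.2 < -b.2) ∨ (-a.2 = -b.2 ∧ a.1 < b.1)

theorem hubLex_trans (a b c : String × Int) (hab : hubLex a b) (hbc : hubLex b c) : hubLex a c := by
  rcases hab with h1 | ⟨h1, h1'⟩ <;> rcases hbc with h2 | ⟨h2, h2'⟩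
  · exact Or.inl (lt_trans h1 h2)
  · exact Or.inl (h2 ▸ h1)
  · exact Or.inl (h1 ▸ h2)
  · exact Or.inr ⟨h1.trans h2, lt_trans h1' h2'⟩

theorem hubLex_ne (a b : String × Int) (h : hubLex a b) : a ≠ b := by
  rintro rfl
  rcases h with h | ⟨_, h⟩ <;> exact lt_irrefl _ h

theorem insertBy_pairwise {α : Type} (r : α → α → Prop) (before : α → α → Bool) (x : α) (ys : List α)
    (htr : ∀ a b c, r a b → r b c → r a c)
    (hys : ys.Pairwise r)
    (h : ∀ y ∈ ys, (before x y = true → r x y) ∧ (before x y = false → r y x)) :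
    (PySem.List.insertBy before x ys).Pairwise r := by
  induction ys with
  | nil => simp [PySem.List.insertBy]
  | cons y ys ih =>
    show (if before x y then x :: y :: ys else y :: PySem.List.insertBy before x ys).Pairwise r
    rcases List.pairwise_cons.1 hys with ⟨hy, hys'⟩
    by_cases hb : before x y = true
    · rw [if_pos hb]
      refine List.pairwise_cons.2 ⟨?_, hys⟩
      intro w hw
      rcases List.mem_cons.1 hw with h1 | h2
      · rw [h1]; exact (h y (by simp)).1 hb
      · exact htr _ _ _ ((h y (by simp)).1 hb) (hy w h2)
    · rw [if_neg hb]
      refine List.pairwise_cons.2 ⟨?_, ?_⟩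
      · intro z hz
        rcases (PySem.List.mem_insertBy before x z ys).1 hz with rfl | hz'
        · exact (h y (by simp)).2 (eq_false_of_ne_true hb)
        · exact hy z hz'
      · exact ih hys' (fun w hw => h w (by simp [hw]))

theorem foldl_insertBy_pairwise {α : Type} (r c : α → α → Prop) (before : α → α → Bool)
    (htr : ∀ a b c, r a b → r b c → r a c)
    (h : ∀ a x, c a x → (before x a = true → r x a) ∧ (before x a = false → r a x)) :
    ∀ (l acc : List α), acc.Pairwise r → (∀ a ∈ acc, ∀ x ∈ l, c a x) → l.Pairwise c →
    (l.foldl (fun acc x => PySem.List.insertBy before x acc) acc).Pairwise r := by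
  intro l
  induction l with
  | nil => intro acc hacc _ _; simpa using hacc
  | cons x l ih =>
    intro acc hacc hcross hl
    rcases List.pairwise_cons.1 hl with ⟨hx, hl'⟩
    simp only [List.foldl_cons]
    refine ih _ ?_ ?_ hl'
    · exact insertBy_pairwise r before x acc htr hacc (fun a ha => h a x (hcross a ha x (by simp)))
    · intro a ha y hy
      rcases (PySem.List.mem_insertBy before x a acc).1 ha with rfl | ha'
      · exact hx y hy
      · exact hcross a ha' y (by simp [hy])

-- A's stable sort by -count of a doc-ascending list is pairwise hubLex.
theorem sortedA_pairwise (l : List (String × Int)) (hl : l.Pairwise (fun a b => a.1 < b.1)) :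
    (PySem.List.sorted l (fun x => -x.2)).Pairwise hubLex := by
  rw [PySem.List.sorted_eq_foldl_insertBy]
  refine foldl_insertBy_pairwise hubLex (fun a b => a.1 < b.1) _ hubLex_trans ?_ l [] (by simp) (by simp) hl
  intro a x hc
  constructor
  · intro hb
    exact Or.inl (by simpa using hb)
  · intro hb
    have hle : -a.2 ≤ -x.2 := not_lt.1 (of_decide_eq_false hb)
    rcases lt_or_eq_of_le hle with hlt | heq
    · exact Or.inl hlt
    · exact Or.inr ⟨heq, hc⟩

-- B's bucket concatenation is pairwise hubLex: counts strictly descend across buckets,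
-- docs strictly ascend inside one.
theorem flatMap_buckets_pairwise (ks : List Int) (docs : Int → List String)
    (hks : ks.Pairwise (fun c c' => c' < c))
    (hdocs : ∀ c ∈ ks, (docs c).Pairwise (· < ·)) :
    (ks.flatMap (fun c => (docs c).map (fun d => (d, c)))).Pairwise hubLex := by
  rw [List.pairwise_flatMap]
  constructor
  · intro c hc
    exact List.pairwise_map.2 ((hdocs c hc).imp (fun h => Or.inr ⟨rfl, h⟩))
  · refine hks.imp_of_mem ?_
    intro c c' hc hc' hlt x hx y hy
    rcases List.mem_map.1 hx with ⟨d, _, rfl⟩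
    rcases List.mem_map.1 hy with ⟨d', _, rfl⟩
    exact Or.inl (by simpa using hlt)

-- Each component of B equals the corresponding component of A.
theorem hub_component_eq (stats : List (String × List (String × Int)))
    (hnd : (stats.map Prod.fst).Nodup) (field : String) (thr : Int) :
    PySem.List.sorted
      (((PySem.List.sorted stats (fun p => p.1)).filter
          (fun p => decide (thr ≤ (PySem.Dict.mk p.2).getD field 0))).map
        (fun p => (p.1, (PySem.Dict.mk p.2).getD field 0)))
      (fun x => -x.2)
    = bucketHubs stats field thr := by
  set cnt : (String × List (String × Int)) → Int :=
    fun p => (PySem.Dict.mk p.2).getD field 0 with hcnt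
  set pred : (String × List (String × Int)) → Bool := fun p => decide (thr ≤ cnt p) with hpred
  set L : List (String × List (String × Int)) := stats.filter pred with hL
  set g : (String × List (String × Int)) → Int × String := fun p => (cnt p, p.1) with hg
  -- the dict B builds
  have hdict : (stats.foldl
      (fun (b : PySem.Dict Int (List String)) p =>
        if thr ≤ cnt p then b.modify (cnt p) [] (fun l => l ++ [p.1]) else b)
      PySem.Dict.empty)
      = (L.map g).foldl (fun b q => b.modify q.1 [] (fun l => l ++ [q.2])) PySem.Dict.empty := by
    rw [PySem.List.foldl_ite_eq_foldl_filter (p := fun p => thr ≤ cnt p)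
        (f := fun (b : PySem.Dict Int (List String)) p => b.modify (cnt p) [] (fun l => l ++ [p.1])),
      List.foldl_map]
  set buckets := (L.map g).foldl (fun b q => b.modify q.1 [] (fun l => l ++ [q.2]))
      (PySem.Dict.empty (κ := Int) (ν := List String)) with hbuckets
  -- its lookups and keys
  have hget : ∀ c : Int, buckets.getD c [] = (L.filter (fun p => cnt p == c)).map (fun p => p.1) := by
    intro c
    rw [hbuckets, PySem.Dict.getD_foldl_modify_append]
    simp [List.filter_map, List.map_map, hg, PySem.Dict.empty, PySem.Dict.getD, PySem.Dict.get?,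
      Function.comp_def]
  have hkeys : buckets.keys = PySem.Set.ofList (L.map cnt) := by
    rw [hbuckets, PySem.Dict.keys_foldl_modify_key (key := fun q : Int × String => q.1)]
    show PySem.Set.update PySem.Dict.empty.keys ((L.map g).map (fun q => q.1)) = _
    rw [List.map_map]
    rfl
  -- descending, duplicate-free count list
  set ks := PySem.List.sorted buckets.keys (fun c => c) true with hks
  have hksnd : ks.Nodup :=
    ((PySem.List.sorted_perm buckets.keys (fun c => c) true).nodup_iff).2
      (hkeys ▸ PySem.Set.nodup_ofList (L.map cnt))
  have hksgt : ks.Pairwise (fun c c' => c' < c) :=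
    ((PySem.List.sorted_pairwise_rev buckets.keys (fun c => c)).and hksnd).imp
      (fun h => lt_of_le_of_ne h.1 h.2.symm)
  -- duplicate-free doc lists
  have hLfst : (L.map Prod.fst).Nodup :=
    hnd.sublist ((List.filter_sublist (l := stats) (p := pred)).map Prod.fst)
  have hdocs_nd : ∀ c : Int, (buckets.getD c []).Nodup := by
    intro c
    rw [hget c]
    exact hLfst.sublist ((List.filter_sublist (l := L) (p := fun p => cnt p == c)).map Prod.fst)
  have hdocs_lt : ∀ c ∈ ks, (PySem.List.sorted (buckets.getD c []) (fun s => s)).Pairwise (· < ·) := by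
    intro c _
    have hnd' : (PySem.List.sorted (buckets.getD c []) (fun s => s)).Nodup :=
      ((PySem.List.sorted_perm _ _ false).nodup_iff).2 (hdocs_nd c)
    exact ((PySem.List.sorted_pairwise (buckets.getD c []) (fun s => s)).and hnd').imp
      (fun h => lt_of_le_of_ne h.1 h.2)
  -- shape of B's output
  have hB : bucketHubs stats field thr
      = ks.flatMap (fun c => (PySem.List.sorted (buckets.getD c []) (fun s => s)).map
          (fun d => (d, c))) := by
    show (PySem.List.sorted (List.foldl _ PySem.Dict.empty stats).keys (fun c => c) true).foldl _ [] = _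
    rw [hdict]
    calc ks.foldl (fun out c => (PySem.List.sorted (buckets.getD c []) (fun s => s)).foldl
            (fun out doc => out ++ [(doc, c)]) out) []
        = ks.foldl (fun out c => out ++ (PySem.List.sorted (buckets.getD c []) (fun s => s)).map
            (fun d => (d, c))) [] := by
          refine PySem.List.foldl_congr_mem _ _ _ _ ?_
          intro acc c _
          exact PySem.List.foldl_append_singleton_eq_map _ _ _
      _ = _ := by rw [PySem.List.foldl_append_eq_flatMap]; simp
  -- B's output is pairwise hubLex and duplicate-free
  have hBpw : (ks.flatMap (fun c => (PySem.List.sorted (buckets.getD c []) (fun s => s)).map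
      (fun d => (d, c)))).Pairwise hubLex :=
    flatMap_buckets_pairwise ks _ hksgt hdocs_lt
  have hBnd : (ks.flatMap (fun c => (PySem.List.sorted (buckets.getD c []) (fun s => s)).map
      (fun d => (d, c)))).Nodup := hBpw.imp (fun h => hubLex_ne _ _ h)
  -- A's input list and the common reference list
  set f : (String × List (String × Int)) → String × Int := fun p => (p.1, cnt p) with hf
  set L1 : List (String × Int) := ((PySem.List.sorted stats (fun p => p.1)).filter pred).map f
    with hL1
  set base : List (String × Int) := L.map f with hbase
  have hperm1 : L1.Perm base :=
    ((PySem.List.sorted_perm stats (fun p => p.1) false).filter pred).map f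
  have hbasend : base.Nodup := by
    refine List.Nodup.of_map Prod.fst ?_
    rw [hbase, List.map_map]
    exact hLfst
  -- membership of B's output = membership of base
  have hmem : ∀ x : String × Int,
      (x ∈ ks.flatMap (fun c => (PySem.List.sorted (buckets.getD c []) (fun s => s)).map
        (fun d => (d, c)))) ↔ x ∈ base := by
    intro x
    rw [List.mem_flatMap]
    constructor
    · rintro ⟨c, _, hx⟩
      rcases List.mem_map.1 hx with ⟨d, hd, rfl⟩
      rw [PySem.List.mem_sorted, hget c] at hd
      rcases List.mem_map.1 hd with ⟨p, hp, rfl⟩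
      rcases List.mem_filter.1 hp with ⟨hpL, hpc⟩
      exact List.mem_map.2 ⟨p, hpL, by simp [hf, eq_of_beq hpc]⟩
    · intro hx
      rcases List.mem_map.1 hx with ⟨p, hpL, rfl⟩
      refine ⟨cnt p, ?_, ?_⟩
      · rw [hks, PySem.List.mem_sorted, hkeys, PySem.Set.mem_ofList]
        exact List.mem_map.2 ⟨p, hpL, rfl⟩
      · refine List.mem_map.2 ⟨p.1, ?_, rfl⟩
        rw [PySem.List.mem_sorted, hget]
        exact List.mem_map.2 ⟨p, List.mem_filter.2 ⟨hpL, by simp⟩, rfl⟩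
  -- A's output is pairwise hubLex
  have hle : (PySem.List.sorted stats (fun p => p.1)).Pairwise (fun a b => a.1 ≤ b.1) :=
    PySem.List.sorted_pairwise stats _
  have hnd' : ((PySem.List.sorted stats (fun p => p.1)).map Prod.fst).Nodup :=
    (((PySem.List.sorted_perm stats (fun p => p.1) false).map Prod.fst).nodup_iff).2 hnd
  have hlt : (PySem.List.sorted stats (fun p => p.1)).Pairwise (fun a b => a.1 < b.1) :=
    (hle.and (List.pairwise_map.1 hnd')).imp (fun h => lt_of_le_of_ne h.1 h.2)
  have hL1lt : L1.Pairwise (fun a b => a.1 < b.1) := by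
    rw [hL1]
    exact List.pairwise_map.2 ((hlt.filter pred).imp (fun h => h))
  have hApw := sortedA_pairwise L1 hL1lt
  -- conclude: two pairwise-hubLex rearrangements of the same duplicate-free list are equal
  rw [hB]
  have hpermAB : (PySem.List.sorted L1 (fun x => -x.2)).Perm
      (ks.flatMap (fun c => (PySem.List.sorted (buckets.getD c []) (fun s => s)).map
        (fun d => (d, c)))) :=
    ((PySem.List.sorted_perm L1 _ _).trans hperm1).trans
      (((List.perm_ext_iff_of_nodup hBnd hbasend).2 hmem).symm)
  refine List.Perm.eq_of_pairwise (le := hubLex) ?_ hApw hBpw hpermAB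
  intro a b _ _ hab hba
  exfalso
  rcases hab with h1 | ⟨h1, h1'⟩ <;> rcases hba with h2 | ⟨h2, h2'⟩
  · exact lt_asymm h1 h2
  · exact absurd h1 (by simp [h2])
  · exact absurd h2 (by simp [h1])
  · exact lt_asymm h1' h2'

-- ===== VERDICT (by name: the statement is the Claim_ definition above) =====
theorem find_hubs_spec : Claim_equal_find_hubs := by
  intro stats _ hpre
  unfold Spec_find_hubs find_hubs_alt
  show find_hubs stats = _
  unfold find_hubs
  rw [PySem.List.foldl_prod_mk
    (f := fun a1 (p : String × List (String × Int)) =>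
      if 8 ≤ (PySem.Dict.mk p.2).getD "outbound" 0 then a1 ++ [(p.1, (PySem.Dict.mk p.2).getD "outbound" 0)] else a1)
    (g := fun a2 (p : String × List (String × Int)) =>
      if 10 ≤ (PySem.Dict.mk p.2).getD "inbound" 0 then a2 ++ [(p.1, (PySem.Dict.mk p.2).getD "inbound" 0)] else a2)]
  rw [PySem.List.foldl_append_ite (p := fun p : String × List (String × Int) => (8:Int) ≤ (PySem.Dict.mk p.2).getD "outbound" 0) (f := fun p => (p.1, (PySem.Dict.mk p.2).getD "outbound" 0)),
      PySem.List.foldl_append_ite (p := fun p : String × List (String × Int) => (10:Int) ≤ (PySem.Dict.mk p.2).getD "inbound" 0) (f := fun p => (p.1, (PySem.Dict.mk p.2).getD "inbound" 0))]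
  simp only [List.nil_append]
  exact congrArg₂ Prod.mk (hub_component_eq stats hpre.1 "outbound" 8) (hub_component_eq stats hpre.1 "inbound" 10)
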